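-- pv_equiv track=rewrite | github.com/JikC/CODE_Solution | test.py | solution
-- ===== SOURCE A (Python) =====
-- def solution(A):
--     # write your code in Python 3.6
--     A = sorted(A)
--     l = len(A)
--     res = 0
--     summa = sum(A)
--     minNum = summa//l if summa%l==0 else summa//l+1
--
--     for i in A:
--         if i<minNum:
--             res += (minNum-i)
--     return res
-- ===== SOURCE B (Python) =====
-- def solution(A):
--     A = sorted(A)
--     l = len(A)
--     summa = sum(A)
--     minNum = summa // l if summa % l == 0 else summa // l + 1
--     # binary search for the first index whose element is >= minNum
--     lo, hi = 0, l
--     while lo < hi: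
--         mid = (lo + hi) // 2
--         if A[mid] < minNum:
--             lo = mid + 1
--         else:
--             hi = mid
--     return minNum * lo - sum(A[:lo])
-- ===== Notes on version B (the rewrite author's own statement) =====
-- stated objective: alternative
-- what changed: A's full linear scan adding (minNum - i) for each element below the ceiled mean is replaced by a hand-written binary search on the sorted list for the first element >= minNum, returning the closed form minNum*k - sum(prefix); the scan-with-predicate disappears.
import Mathlib
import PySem

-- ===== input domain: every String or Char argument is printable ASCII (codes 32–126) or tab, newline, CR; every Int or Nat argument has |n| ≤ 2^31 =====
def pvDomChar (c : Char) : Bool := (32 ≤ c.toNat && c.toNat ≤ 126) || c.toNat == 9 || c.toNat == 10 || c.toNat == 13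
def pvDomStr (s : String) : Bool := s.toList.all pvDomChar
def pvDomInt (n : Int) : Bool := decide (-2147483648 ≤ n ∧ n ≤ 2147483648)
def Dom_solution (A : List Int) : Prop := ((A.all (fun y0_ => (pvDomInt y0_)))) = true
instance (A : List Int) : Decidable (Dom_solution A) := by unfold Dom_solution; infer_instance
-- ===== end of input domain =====

-- B replaces A's linear scan-with-predicate by a binary search for the first element >= minNum
-- plus the closed form minNum*k - sum(prefix); same sort, same result (alternative decomposition, not claimed faster).

-- ===== PORT A =====
def solution (A : List Int) : Int :=
  let S := PySem.List.sorted A (fun x => x)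
  let l : Int := (S.length : Int)
  let summa := S.sum
  let minNum := if PySem.Int.mod summa l == 0 then PySem.Int.floordiv summa l
                else PySem.Int.floordiv summa l + 1
  S.foldl (fun res i => if i < minNum then res + (minNum - i) else res) 0

-- ===== PORT B =====
-- the while-loop of Source B, with fuel = hi - lo supplied at the call site to make it total;
-- A[mid] is exact as getD since 0 ≤ lo ≤ mid < hi ≤ len(A) whenever it is read
def bsGo (S : List Int) (m : Int) : Nat → Nat → Nat → Nat
  | 0, lo, _ => lo
  | fuel + 1, lo, hi =>
    if lo < hi then
      let mid := (lo + hi) / 2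
      if S.getD mid 0 < m then bsGo S m fuel (mid + 1) hi else bsGo S m fuel lo mid
    else lo

def bsLoop (S : List Int) (m : Int) (lo hi : Nat) : Nat := bsGo S m (hi - lo) lo hi

def solution_alt (A : List Int) : Int :=
  let S := PySem.List.sorted A (fun x => x)
  let l : Int := (S.length : Int)
  let summa := S.sum
  let minNum := if PySem.Int.mod summa l == 0 then PySem.Int.floordiv summa l
                else PySem.Int.floordiv summa l + 1
  let k := bsLoop S minNum 0 S.length
  -- A[:lo] is exact as take k since 0 ≤ k ≤ len(A)
  minNum * (k : Int) - (S.take k).sum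

-- ===== PRECONDITION & SPEC =====
-- Pre_ excludes only the empty list, on which A raises ZeroDivisionError (summa // l with l = 0).
def Pre_solution (A : List Int) : Prop := A ≠ []
instance (A : List Int) : Decidable (Pre_solution A) := by unfold Pre_solution; infer_instance
def pvWitness_solution : List Int := [3, 1, 2]

def Spec_solution (A : List Int) (out : Int) : Prop := out = solution_alt A
instance (A : List Int) (out : Int) : Decidable (Spec_solution A out) := by unfold Spec_solution; infer_instance

-- ===== CLAIM (what is proved, stated in full; the proofs are below) =====
def Claim_equal_solution : Prop := ∀ (A : List Int), Dom_solution A → Pre_solution A → Spec_solution A (solution A)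

-- ===== LEMMAS AND PROOFS =====

-- binary-search invariant: the result r splits S into a prefix of elements < m and a suffix of elements ≥ m
theorem bsGo_inv (S : List Int) (m : Int) (hs : S.Pairwise (· ≤ ·)) (fuel : Nat) :
    ∀ (lo hi : Nat), hi - lo ≤ fuel → lo ≤ hi → hi ≤ S.length →
    (∀ j (hj : j < S.length), j < lo → S[j] < m) →
    (∀ j (hj : j < S.length), hi ≤ j → m ≤ S[j]) →
    bsGo S m fuel lo hi ≤ S.length ∧
      (∀ j (hj : j < S.length), j < bsGo S m fuel lo hi → S[j] < m) ∧
      (∀ j (hj : j < S.length), bsGo S m fuel lo hi ≤ j → m ≤ S[j]) := by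
  have hmono : ∀ (p q : Nat) (hpq : p ≤ q) (hq : q < S.length),
      S[p]'(by omega) ≤ S[q] := by
    intro p q hpq hq
    rcases Nat.lt_or_ge p q with hc | hc
    · exact (List.pairwise_iff_getElem.mp hs) p q (by omega) hq hc
    · have : p = q := by omega
      subst this; exact le_refl _
  induction fuel with
  | zero =>
    intro lo hi hfuel hlh hhi hlo hge
    have : lo = hi := by omega
    subst this
    simp only [bsGo]
    exact ⟨by omega, fun j hj hjlt => hlo j hj hjlt, fun j hj hjge => hge j hj (by omega)⟩
  | succ f ih =>
    intro lo hi hfuel hlh hhi hlo hge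
    by_cases h : lo < hi
    · have hmidlt : (lo + hi) / 2 < S.length := by omega
      have hgetd : S.getD ((lo + hi) / 2) 0 = S[(lo + hi) / 2] :=
        List.getD_eq_getElem S 0 hmidlt
      by_cases hlt : S.getD ((lo + hi) / 2) 0 < m
      · -- S[mid] < m, continue with (mid+1, hi)
        have hres : bsGo S m (f + 1) lo hi = bsGo S m f ((lo + hi) / 2 + 1) hi := by
          simp only [bsGo, if_pos h, if_pos hlt]
        rw [hres]
        have hltm : S[(lo + hi) / 2] < m := hgetd ▸ hlt
        exact ih ((lo + hi) / 2 + 1) hi (by omega) (by omega) hhi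
          (fun j hj hjlt => lt_of_le_of_lt (hmono j ((lo + hi) / 2) (by omega) hmidlt) hltm) hge
      · -- m ≤ S[mid], continue with (lo, mid)
        have hres : bsGo S m (f + 1) lo hi = bsGo S m f lo ((lo + hi) / 2) := by
          simp only [bsGo, if_pos h, if_neg hlt]
        rw [hres]
        have hgem : m ≤ S[(lo + hi) / 2] := not_lt.mp (hgetd ▸ hlt)
        exact ih lo ((lo + hi) / 2) (by omega) (by omega) (by omega) hlo
          (fun j hj hjge => le_trans hgem (hmono ((lo + hi) / 2) j hjge hj))
    · have hres : bsGo S m (f + 1) lo hi = lo := by simp only [bsGo, if_neg h]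
      rw [hres]
      exact ⟨by omega, fun j hj hjlt => hlo j hj hjlt, fun j hj hjge => hge j hj (by omega)⟩

theorem bsLoop_inv (S : List Int) (m : Int) (hs : S.Pairwise (· ≤ ·)) (lo hi : Nat)
    (hlh : lo ≤ hi) (hhi : hi ≤ S.length)
    (hlo : ∀ j (hj : j < S.length), j < lo → S[j] < m)
    (hge : ∀ j (hj : j < S.length), hi ≤ j → m ≤ S[j]) :
    bsLoop S m lo hi ≤ S.length ∧
      (∀ j (hj : j < S.length), j < bsLoop S m lo hi → S[j] < m) ∧
      (∀ j (hj : j < S.length), bsLoop S m lo hi ≤ j → m ≤ S[j]) := by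
  exact bsGo_inv S m hs (hi - lo) lo hi (by omega) hlh hhi hlo hge

-- the part of A's fold over elements all < m
theorem foldl_all_lt (m : Int) (L : List Int) (acc : Int)
    (h : ∀ i ∈ L, i < m) :
    L.foldl (fun res i => if i < m then res + (m - i) else res) acc
      = acc + m * (L.length : Int) - L.sum := by
  induction L generalizing acc with
  | nil => simp
  | cons a t ih =>
    have ha : a < m := h a (by simp)
    simp only [List.foldl_cons, if_pos ha, List.length_cons, List.sum_cons]
    rw [ih _ (fun i hi => h i (by simp [hi]))]
    push_cast; ring

-- the part of A's fold over elements all ≥ m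
theorem foldl_none_lt (m : Int) (L : List Int) (acc : Int)
    (h : ∀ i ∈ L, ¬ i < m) :
    L.foldl (fun res i => if i < m then res + (m - i) else res) acc = acc := by
  induction L generalizing acc with
  | nil => simp
  | cons a t ih =>
    simp only [List.foldl_cons, if_neg (h a (by simp))]
    exact ih _ (fun i hi => h i (by simp [hi]))

theorem main_eq (A : List Int) : solution A = solution_alt A := by
  unfold solution solution_alt
  simp only []
  set S := PySem.List.sorted A (fun x => x) with hS
  set m := (if PySem.Int.mod S.sum (S.length : Int) == 0
            then PySem.Int.floordiv S.sum (S.length : Int)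
            else PySem.Int.floordiv S.sum (S.length : Int) + 1) with hm
  set r := bsLoop S m 0 S.length with hr
  have hs : S.Pairwise (· ≤ ·) := PySem.List.sorted_pairwise A (fun x => x)
  obtain ⟨hrlen, hpre, hsuf⟩ :=
    bsLoop_inv S m hs 0 S.length (by omega) (le_refl _)
      (fun j hj hjlt => by omega) (fun j hj hjge => by omega)
  have htd : S = S.take r ++ S.drop r := (List.take_append_drop r S).symm
  have hlen_take : (S.take r).length = r := by
    rw [List.length_take]; omega
  calc S.foldl (fun res i => if i < m then res + (m - i) else res) 0
      = (S.take r ++ S.drop r).foldl (fun res i => if i < m then res + (m - i) else res) 0 := by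
        rw [← htd]
    _ = (S.drop r).foldl (fun res i => if i < m then res + (m - i) else res)
          ((S.take r).foldl (fun res i => if i < m then res + (m - i) else res) 0) := by
        rw [List.foldl_append]
    _ = m * (r : Int) - (S.take r).sum := by
        rw [foldl_all_lt m (S.take r) 0 ?_, hlen_take]
        · rw [foldl_none_lt m (S.drop r) _ ?_]
          · ring
          · intro i hi
            obtain ⟨j, hj, rfl⟩ := List.getElem_of_mem hi
            rw [List.getElem_drop]
            have hjl : r + j < S.length := by
              have := hj; rw [List.length_drop] at this; omega
            exact not_lt.mpr (hsuf (r + j) hjl (by omega))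
        · intro i hi
          obtain ⟨j, hj, rfl⟩ := List.getElem_of_mem hi
          rw [List.getElem_take]
          have hjr : j < r := by rw [hlen_take] at hj; omega
          exact hpre j (by omega) hjr

-- ===== VERDICT (by name: the statement is the Claim_ definition above) =====
theorem solution_spec : Claim_equal_solution := by
  intro A _ _
  unfold Spec_solution
  exact main_eq A
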